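-- pv_equiv track=rewrite | github.com/jclements3/HarpHymnal | trefoil/reharm/legality.py | _group_bars_by_phrase
-- ===== SOURCE A (Python) =====
-- def _group_bars_by_phrase(bars: list[dict]) -> list[list[dict]]:
--     """Segment the bar sequence at ``phrase_role.opening`` boundaries.
--
--     The variation JSON doesn't carry the hymn's phrase list, but every
--     phrase-opening bar is tagged with ``phrase_role.opening`` by the
--     selector.  That's enough to re-derive phrase groupings for
--     lever-budget checking.  A degenerate fallback treats the whole
--     variation as one phrase when no openings are present.
--     """
--     groups: list[list[dict]] = []
--     current: list[dict] = []
--     for b in bars: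
--         role = (b.get("tactic_manifest") or {}).get("phrase_role")
--         if role == "phrase_role.opening" and current:
--             groups.append(current)
--             current = []
--         current.append(b)
--     if current:
--         groups.append(current)
--     if not groups:
--         groups = [bars]
--     return groups
-- ===== SOURCE B (Python) =====
-- def _group_bars_by_phrase(bars: list[dict]) -> list[list[dict]]:
--     """Index-based reimplementation: collect group start indices, then slice."""
--     starts = [i for i, b in enumerate(bars)
--               if i == 0 or (b.get("tactic_manifest") or {}).get("phrase_role") == "phrase_role.opening"]
--     if not starts:
--         return [bars]
--     return [bars[s:e] for s, e in zip(starts, starts[1:] + [len(bars)])]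
-- ===== Notes on version B (the rewrite author's own statement) =====
-- stated objective: alternative
-- what changed: Instead of accumulating a current group and flushing it at each opening boundary, B first collects the start indices of groups (index 0 plus every later opening bar) and then builds the output by slicing bars between consecutive start indices.
import Mathlib
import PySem

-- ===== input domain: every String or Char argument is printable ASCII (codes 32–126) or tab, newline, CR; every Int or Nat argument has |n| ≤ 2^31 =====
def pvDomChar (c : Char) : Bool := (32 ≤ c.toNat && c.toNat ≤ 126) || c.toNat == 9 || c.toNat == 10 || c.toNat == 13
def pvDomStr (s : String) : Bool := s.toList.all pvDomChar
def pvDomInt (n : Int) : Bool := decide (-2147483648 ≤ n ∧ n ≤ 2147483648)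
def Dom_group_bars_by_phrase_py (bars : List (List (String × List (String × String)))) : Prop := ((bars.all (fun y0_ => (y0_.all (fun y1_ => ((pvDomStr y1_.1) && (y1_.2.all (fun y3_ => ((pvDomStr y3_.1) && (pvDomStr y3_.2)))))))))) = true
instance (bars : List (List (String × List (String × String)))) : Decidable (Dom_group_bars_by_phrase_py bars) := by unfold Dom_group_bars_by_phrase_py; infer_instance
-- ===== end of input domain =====

-- B re-implements the grouping by collecting group start indices and slicing between
-- them, instead of A's accumulate-and-flush loop; same values on every input ("alternative").

abbrev PvBar := List (String × List (String × String))

-- ===== PORT A =====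
-- (b.get("tactic_manifest") or {}).get("phrase_role")  — shared by both Pythons verbatim
def pvRole (b : PvBar) : Option String :=
  (PySem.Dict.mk ((PySem.Dict.get? (PySem.Dict.mk b) "tactic_manifest").getD [])).get? "phrase_role"

def pvIsOpening (b : PvBar) : Bool := pvRole b == some "phrase_role.opening"

-- the body of A's for-loop, acting on the state (groups, current)
def pvStep (st : List (List PvBar) × List PvBar) (b : PvBar) : List (List PvBar) × List PvBar :=
  if pvIsOpening b && !st.2.isEmpty then (st.1 ++ [st.2], [b]) else (st.1, st.2 ++ [b])

def group_bars_by_phrase_py (bars : List (List (String × List (String × String)))) :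
    List (List (List (String × List (String × String)))) :=
  let st := bars.foldl pvStep ([], [])
  let groups := if !st.2.isEmpty then st.1 ++ [st.2] else st.1
  if groups.isEmpty then [bars] else groups

-- ===== PORT B =====
-- [i for i, b in enumerate(bars) if i == 0 or <opening>]
def pvStarts (bars : List PvBar) : List Int :=
  ((PySem.List.enumerate bars).filter (fun ib => ib.1 == 0 || pvIsOpening ib.2)).map (·.1)

-- [bars[s:e] for s, e in zip(starts, starts[1:] + [len(bars)])]
def pvSliceMap (bars : List PvBar) (starts : List Int) (e : Int) : List (List PvBar) :=
  (starts.zip (starts.tail ++ [e])).map (fun se => PySem.List.slice bars (some se.1) (some se.2))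

def group_bars_by_phrase_py_alt (bars : List (List (String × List (String × String)))) :
    List (List (List (String × List (String × String)))) :=
  let starts := pvStarts bars
  if starts.isEmpty then [bars]
  else pvSliceMap bars starts (bars.length : Int)

-- ===== PRECONDITION & SPEC =====
def Spec_group_bars_by_phrase_py (bars : List (List (String × List (String × String)))) (out : List (List (List (String × List (String × String))))) : Prop := out = group_bars_by_phrase_py_alt bars
instance (bars : List (List (String × List (String × String)))) (out : List (List (List (String × List (String × String))))) : Decidable (Spec_group_bars_by_phrase_py bars out) := by unfold Spec_group_bars_by_phrase_py; infer_instance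

-- ===== CLAIM (what is proved, stated in full; the proofs are below) =====
def Claim_equal_group_bars_by_phrase_py : Prop := ∀ (bars : List (List (String × List (String × String)))), Dom_group_bars_by_phrase_py bars → Spec_group_bars_by_phrase_py bars (group_bars_by_phrase_py bars)

-- ===== LEMMAS AND PROOFS =====

lemma pvEnumerate_append (xs : List PvBar) (x : PvBar) (s : Int) :
    PySem.List.enumerate (xs ++ [x]) s
      = PySem.List.enumerate xs s ++ [((s + xs.length : Int), x)] := by
  induction xs generalizing s with
  | nil => simp [PySem.List.enumerate]
  | cons a t ih =>
      simp [PySem.List.enumerate_cons, ih]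
      omega

lemma pvStarts_append (xs : List PvBar) (b : PvBar) (h : xs ≠ []) :
    pvStarts (xs ++ [b])
      = pvStarts xs ++ (if pvIsOpening b then [(xs.length : Int)] else []) := by
  have hx : xs.length ≠ 0 := by simpa [List.length_eq_zero_iff] using h
  by_cases hb : pvIsOpening b <;>
    simp [pvStarts, pvEnumerate_append, List.filter_append, hb, hx]

-- slice is unaffected by appending when the upper bound stays inside xs
lemma pvSlice_stable (xs : List PvBar) (b : PvBar) (a c : Int)
    (h0 : 0 ≤ a) (h1 : 0 ≤ c) (h2 : c ≤ (xs.length : Int)) :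
    PySem.List.slice (xs ++ [b]) (some a) (some c) = PySem.List.slice xs (some a) (some c) := by
  rw [PySem.List.slice_toNat (xs ++ [b]) h0 h1, PySem.List.slice_toNat xs h0 h1]
  by_cases hal : a.toNat ≤ xs.length
  · rw [List.drop_append_of_le_length hal]
    have hcn : c.toNat ≤ xs.length := by omega
    have : c.toNat - a.toNat ≤ (xs.drop a.toNat).length := by
      simp [List.length_drop]; omega
    rw [List.take_append_of_le_length this]
  · have hcn : c.toNat ≤ xs.length := by omega
    have hz : c.toNat - a.toNat = 0 := by omega
    simp [hz]

-- slicing up to the new end picks up the appended element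
lemma pvSlice_snoc (xs : List PvBar) (b : PvBar) (a : Int)
    (h0 : 0 ≤ a) (h2 : a ≤ (xs.length : Int)) :
    PySem.List.slice (xs ++ [b]) (some a) (some ((xs.length : Int) + 1))
      = PySem.List.slice xs (some a) (some (xs.length : Int)) ++ [b] := by
  have ha' : a.toNat ≤ xs.length := by omega
  rw [PySem.List.slice_toNat (xs ++ [b]) h0 (by omega), PySem.List.slice_toNat xs h0 (by omega)]
  rw [List.drop_append_of_le_length ha']
  have e1 : ((xs.length : Int) + 1).toNat = xs.length + 1 := by omega
  have e2 : ((xs.length : Int)).toNat = xs.length := by omega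
  rw [e1, e2]
  rw [List.take_of_length_le (by simp only [List.length_append, List.length_drop,
        List.length_cons, List.length_nil]; omega),
     List.take_of_length_le (by simp only [List.length_drop]; omega)]

lemma pvSliceMap_cons₂ (xs : List PvBar) (a a' : Int) (s : List Int) (e : Int) :
    pvSliceMap xs (a :: a' :: s) e
      = PySem.List.slice xs (some a) (some a') :: pvSliceMap xs (a' :: s) e := by
  simp [pvSliceMap]

-- appending a non-opening bar extends the last group
lemma pvH1 (s : List Int) (a : Int) (xs : List PvBar) (b : PvBar)
    (ha0 : 0 ≤ a) (ha1 : a ≤ (xs.length : Int))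
    (hs : ∀ i ∈ s, 0 ≤ i ∧ i ≤ (xs.length : Int)) :
    ∃ g c, pvSliceMap xs (a :: s) (xs.length : Int) = g ++ [c] ∧
      pvSliceMap (xs ++ [b]) (a :: s) ((xs.length : Int) + 1) = g ++ [c ++ [b]] := by
  induction s generalizing a with
  | nil =>
      refine ⟨[], PySem.List.slice xs (some a) (some (xs.length : Int)), by simp [pvSliceMap], ?_⟩
      simpa [pvSliceMap] using pvSlice_snoc xs b a ha0 ha1
  | cons a' t ih =>
      obtain ⟨ha'0, ha'1⟩ := hs a' (List.mem_cons_self)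
      obtain ⟨g, c, hg, hgb⟩ := ih a' ha'0 ha'1 (fun i hi => hs i (List.mem_cons_of_mem _ hi))
      refine ⟨PySem.List.slice xs (some a) (some a') :: g, c, ?_, ?_⟩
      · rw [pvSliceMap_cons₂, hg]; simp
      · rw [pvSliceMap_cons₂, pvSlice_stable xs b a a' ha0 ha'0 ha'1, hgb]; simp

-- appending an opening bar adds a fresh singleton group
lemma pvH2 (s : List Int) (a : Int) (xs : List PvBar) (b : PvBar)
    (ha0 : 0 ≤ a) (ha1 : a ≤ (xs.length : Int))
    (hs : ∀ i ∈ s, 0 ≤ i ∧ i ≤ (xs.length : Int)) :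
    pvSliceMap (xs ++ [b]) (a :: (s ++ [(xs.length : Int)])) ((xs.length : Int) + 1)
      = pvSliceMap xs (a :: s) (xs.length : Int) ++ [[b]] := by
  induction s generalizing a with
  | nil =>
      have h1 : PySem.List.slice (xs ++ [b]) (some a) (some (xs.length : Int))
          = PySem.List.slice xs (some a) (some (xs.length : Int)) :=
        pvSlice_stable xs b a _ ha0 (by omega) le_rfl
      have h2 : PySem.List.slice (xs ++ [b]) (some (xs.length : Int)) (some ((xs.length : Int) + 1))
          = [b] := by
        have hx := pvSlice_snoc xs b (xs.length : Int) (by omega) le_rfl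
        rw [hx, PySem.List.slice_toNat xs (by omega) (by omega)]
        simp
      simp [pvSliceMap, h1, h2]
  | cons a' t ih =>
      obtain ⟨ha'0, ha'1⟩ := hs a' (List.mem_cons_self)
      have ihh := ih a' ha'0 ha'1 (fun i hi => hs i (List.mem_cons_of_mem _ hi))
      have e : (a' :: t) ++ [(xs.length : Int)] = a' :: (t ++ [(xs.length : Int)]) := rfl
      rw [e, pvSliceMap_cons₂, pvSliceMap_cons₂,
        pvSlice_stable xs b a a' ha0 ha'0 ha'1, ihh]
      simp

-- main invariant linking A's loop state to B's start-index slices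
lemma pvMain (xs : List PvBar) (h : xs ≠ []) :
    ∃ a s, pvStarts xs = a :: s ∧ 0 ≤ a ∧ a ≤ (xs.length : Int) ∧
      (∀ i ∈ s, 0 ≤ i ∧ i ≤ (xs.length : Int)) ∧
      (xs.foldl pvStep ([], [])).2 ≠ [] ∧
      pvSliceMap xs (pvStarts xs) (xs.length : Int)
        = (xs.foldl pvStep ([], [])).1 ++ [(xs.foldl pvStep ([], [])).2] := by
  induction xs using List.reverseRecOn with
  | nil => cases h rfl
  | append_singleton ys y ih =>
      by_cases hys : ys = []
      · subst hys
        have hfold : List.foldl pvStep ([], []) ([] ++ [y]) = ([], [y]) := by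
          simp only [List.nil_append, List.foldl_cons, List.foldl_nil, pvStep,
            List.isEmpty_nil, Bool.not_true, Bool.and_false, Bool.false_eq_true,
            if_false]
        refine ⟨0, [], ?_, le_refl _, by simp, by simp, ?_, ?_⟩
        · simp [pvStarts, PySem.List.enumerate_cons, PySem.List.enumerate_nil]
        · rw [hfold]; simp
        · have hsts : pvStarts ([] ++ [y]) = [0] := by
            simp [pvStarts, PySem.List.enumerate_cons, PySem.List.enumerate_nil]
          rw [hsts, hfold]
          simp only [pvSliceMap, List.nil_append, List.length_cons, List.length_nil,
            List.tail_cons, List.zip_cons_cons, List.zip_nil_left,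
            List.map_cons, List.map_nil]
          rw [PySem.List.slice_zero_start]
          norm_num
          rw [PySem.List.slice_to [y] (by norm_num : (0:Int) ≤ 1)]
          simp
      · obtain ⟨a, s, hst, ha0, ha1, hs, hne, heq⟩ := ih hys
        have hfold : (ys ++ [y]).foldl pvStep ([], []) = pvStep (ys.foldl pvStep ([], [])) y := by
          simp [List.foldl_append]
        have hlen : (((ys ++ [y]).length : Int)) = (ys.length : Int) + 1 := by
          simp
        rw [hst] at heq
        have hnotE : (ys.foldl pvStep ([], [])).2.isEmpty = false := by
          simpa [List.isEmpty_iff] using hne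
        by_cases hop : pvIsOpening y
        · have hstep : pvStep (ys.foldl pvStep ([], [])) y
              = ((ys.foldl pvStep ([], [])).1 ++ [(ys.foldl pvStep ([], [])).2], [y]) := by
            simp [pvStep, hop, hnotE]
          refine ⟨a, s ++ [(ys.length : Int)], ?_, ha0, ?_, ?_, ?_, ?_⟩
          · rw [pvStarts_append ys y hys, hst]; simp [hop]
          · rw [hlen]; omega
          · intro i hi
            rcases List.mem_append.mp hi with hi | hi
            · have := hs i hi; rw [hlen]; omega
            · simp at hi; subst hi; rw [hlen]; constructor <;> [positivity; omega]
          · rw [hfold, hstep]; simp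
          · rw [pvStarts_append ys y hys, hst, hfold, hstep, hlen]
            simp only [if_pos hop]
            have h2 := pvH2 s a ys y ha0 ha1 hs
            simp only [List.cons_append] at h2 ⊢
            rw [h2, heq]
        · have hstep : pvStep (ys.foldl pvStep ([], [])) y
              = ((ys.foldl pvStep ([], [])).1, (ys.foldl pvStep ([], [])).2 ++ [y]) := by
            simp [pvStep, hop]
          obtain ⟨g, c, hg, hgb⟩ := pvH1 s a ys y ha0 ha1 hs
          obtain ⟨hg1, hg2⟩ := List.append_inj' (hg.symm.trans heq) rfl
          have hc : c = (ys.foldl pvStep ([], [])).2 := by simpa using hg2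
          refine ⟨a, s, ?_, ha0, by rw [hlen]; omega, ?_, ?_, ?_⟩
          · rw [pvStarts_append ys y hys, hst]; simp [hop]
          · intro i hi; have := hs i hi; rw [hlen]; omega
          · rw [hfold, hstep]; simp
          · rw [pvStarts_append ys y hys, hst, hfold, hstep, hlen]
            simp only [if_neg hop, List.append_nil]
            rw [hgb, hg1, hc]

-- ===== VERDICT (by name: the statement is the Claim_ definition above) =====
theorem group_bars_by_phrase_py_spec : Claim_equal_group_bars_by_phrase_py := by
  intro bars _
  unfold Spec_group_bars_by_phrase_py
  by_cases hb : bars = []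
  · subst hb; rfl
  · obtain ⟨a, s, hst, ha0, ha1, hs, hne, heq⟩ := pvMain bars hb
    rw [hst] at heq
    have hnotE : (bars.foldl pvStep ([], [])).2.isEmpty = false := by
      simpa [List.isEmpty_iff] using hne
    unfold group_bars_by_phrase_py group_bars_by_phrase_py_alt
    simp only [hnotE, Bool.not_false, hst, List.isEmpty_cons, Bool.false_eq_true,
      if_false, heq]
    simp
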